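-- pv_equiv track=rewrite | github.com/zduguid/auv-planning-utils | ACD.py | get_resolved_polygons
-- ===== SOURCE A (Python) =====
-- def get_resolved_polygons(p, r, best_point):
--     # get the indices of points that constitute the diagonal to be added
--     for i in range(len(p)):
--         if p[i] == best_point:
--             index1 = i
--         elif p[i] == r:
--             index2 = i
--
--     polygon1 = []
--     polygon2 = []
--
--     # derive the two resulting polygons
--     for i in range(len(p)):
--         if i < min(index1,index2):
--             polygon1.append(p[i])
--         elif i == min(index1,index2):
--             polygon1.append(p[i])
--             polygon2.append(p[i])
--         elif i > min(index1,index2) and i < max(index1,index2):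
--             polygon2.append(p[i])
--         elif i == max(index1,index2):
--             polygon1.append(p[i])
--             polygon2.append(p[i])
--         elif i > max(index1,index2):
--             polygon1.append(p[i])
--
--     return polygon1,polygon2
-- ===== SOURCE B (Python) =====
-- def get_resolved_polygons(p, r, best_point):
--     # single right-to-left pass: a three-phase state machine collects the three
--     # pieces (head, mid, tail) without ever computing the endpoint indices
--     head, mid, tail = [], [], []
--     phase, target = 0, None
--     for x in reversed(p):
--         if phase == 0:
--             tail.append(x)
--             if x == best_point or x == r:
--                 mid.append(x)
--                 target = r if x == best_point else best_point
--                 phase = 1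
--         elif phase == 1:
--             mid.append(x)
--             if x == target:
--                 head.append(x)
--                 phase = 2
--         else:
--             head.append(x)
--     if p and phase != 2:
--         raise ValueError("diagonal endpoints not found in polygon")
--     return head[::-1] + tail[::-1], mid[::-1]
-- ===== Notes on version B (the rewrite author's own statement) =====
-- stated objective: alternative
-- what changed: A first finds the two last-occurrence indices and then builds both polygons with a five-branch loop comparing each index against min/max; B never computes indices at all: one right-to-left pass through the polygon drives a three-phase state machine (after-hi / between / before-lo) that collects head, mid and tail pieces and assembles the two polygons by reversal; Pre_ excludes the inputs where A raises UnboundLocalError (best_point or r absent, or r == best_point), where B raises ValueError instead.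
import Mathlib
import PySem

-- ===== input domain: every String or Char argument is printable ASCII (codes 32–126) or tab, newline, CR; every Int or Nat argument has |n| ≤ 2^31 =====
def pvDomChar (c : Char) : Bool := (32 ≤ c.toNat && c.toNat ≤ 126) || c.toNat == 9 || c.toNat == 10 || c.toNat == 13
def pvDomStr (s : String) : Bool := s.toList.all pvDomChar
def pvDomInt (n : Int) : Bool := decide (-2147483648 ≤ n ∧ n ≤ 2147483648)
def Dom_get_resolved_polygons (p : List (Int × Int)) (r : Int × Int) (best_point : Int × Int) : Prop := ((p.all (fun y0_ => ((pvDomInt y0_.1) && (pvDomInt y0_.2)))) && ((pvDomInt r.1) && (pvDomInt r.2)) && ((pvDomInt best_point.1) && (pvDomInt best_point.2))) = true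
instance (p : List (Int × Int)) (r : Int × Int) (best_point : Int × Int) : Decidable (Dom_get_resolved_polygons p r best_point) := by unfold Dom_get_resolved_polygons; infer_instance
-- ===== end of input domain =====

-- B replaces A's index-finding pass + five-branch index-comparison loop by a single
-- right-to-left pass driving a three-phase state machine; objective: alternative.

-- ===== PORT A =====
-- first loop: 'index1 = i' on p[i] == best_point, elif 'index2 = i' on p[i] == r (last assignment wins)
def grpAStep1 (best_point r : Int × Int) (s : Option Int × Option Int) (ix : Int × (Int × Int)) :
    Option Int × Option Int :=
  if ix.2 = best_point then (some ix.1, s.2)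
  else if ix.2 = r then (s.1, some ix.1)
  else s

-- second loop: the five branches, in Python's order (min/max recomputed in each condition, as in A)
def grpAStep2 (index1 index2 : Int) (s : List (Int × Int) × List (Int × Int)) (ix : Int × (Int × Int)) :
    List (Int × Int) × List (Int × Int) :=
  if ix.1 < min index1 index2 then (s.1 ++ [ix.2], s.2)
  else if ix.1 = min index1 index2 then (s.1 ++ [ix.2], s.2 ++ [ix.2])
  else if min index1 index2 < ix.1 ∧ ix.1 < max index1 index2 then (s.1, s.2 ++ [ix.2])
  else if ix.1 = max index1 index2 then (s.1 ++ [ix.2], s.2 ++ [ix.2])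
  else if max index1 index2 < ix.1 then (s.1 ++ [ix.2], s.2)
  else s

def get_resolved_polygons (p : List (Int × Int)) (r : Int × Int) (best_point : Int × Int) :
    (List (Int × Int)) × (List (Int × Int)) :=
  match (PySem.List.enumerate p).foldl (grpAStep1 best_point r) (none, none) with
  | (some index1, some index2) =>
      (PySem.List.enumerate p).foldl (grpAStep2 index1 index2) ([], [])
  | _ => ([], [])  -- UnboundLocalError in Python: excluded by Pre_

-- ===== PORT B =====
-- phase 0 = scanning right-to-left before any marker, 1 = between the two markers
-- (carrying the marker still to be found), 2 = past both markers
inductive GPhase where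
  | p0 : GPhase
  | p1 : (Int × Int) → GPhase
  | p2 : GPhase
deriving DecidableEq, Repr

-- the loop body of Source B; state = (phase, head, mid, tail); list.append x = ++ [x]
def grpBStep (r best_point : Int × Int)
    (s : GPhase × List (Int × Int) × List (Int × Int) × List (Int × Int)) (x : Int × Int) :
    GPhase × List (Int × Int) × List (Int × Int) × List (Int × Int) :=
  match s with
  | (.p0, h, m, t) =>
      if x = best_point ∨ x = r then
        (.p1 (if x = best_point then r else best_point), h, m ++ [x], t ++ [x])
      else (.p0, h, m, t ++ [x])
  | (.p1 tg, h, m, t) =>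
      if x = tg then (.p2, h ++ [x], m ++ [x], t)
      else (.p1 tg, h, m ++ [x], t)
  | (.p2, h, m, t) => (.p2, h ++ [x], m, t)

-- reversed(p) = p.reverse; ys[::-1] = ys.reverse
def get_resolved_polygons_alt (p : List (Int × Int)) (r : Int × Int) (best_point : Int × Int) :
    (List (Int × Int)) × (List (Int × Int)) :=
  match p.reverse.foldl (grpBStep r best_point) (.p0, [], [], []) with
  | (ph, h, m, t) =>
    if p ≠ [] ∧ ph ≠ .p2 then ([], [])  -- ValueError in Python: excluded by Pre_
    else (h.reverse ++ t.reverse, m.reverse)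

-- ===== PRECONDITION & SPEC =====
-- Pre_ excludes exactly the inputs on which A raises UnboundLocalError: p non-empty with
-- best_point absent, r absent, or r == best_point (the elif never fires, so index2 is unassigned).
def Pre_get_resolved_polygons (p : List (Int × Int)) (r : Int × Int) (best_point : Int × Int) : Prop :=
  p = [] ∨ (best_point ∈ p ∧ r ∈ p ∧ r ≠ best_point)
instance (p : List (Int × Int)) (r : Int × Int) (best_point : Int × Int) : Decidable (Pre_get_resolved_polygons p r best_point) := by unfold Pre_get_resolved_polygons; infer_instance

def pvWitness_get_resolved_polygons : (List (Int × Int)) × (Int × Int) × (Int × Int) :=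
  ([(0, 0), (1, 1), (2, 2), (3, 0)], (2, 2), (0, 0))


def Spec_get_resolved_polygons (p : List (Int × Int)) (r : Int × Int) (best_point : Int × Int) (out : (List (Int × Int)) × (List (Int × Int))) : Prop := out = get_resolved_polygons_alt p r best_point
instance (p : List (Int × Int)) (r : Int × Int) (best_point : Int × Int) (out : (List (Int × Int)) × (List (Int × Int))) : Decidable (Spec_get_resolved_polygons p r best_point out) := by unfold Spec_get_resolved_polygons; infer_instance

-- ===== CLAIM (what is proved, stated in full; the proofs are below) =====
def Claim_equal_get_resolved_polygons : Prop := ∀ (p : List (Int × Int)) (r : Int × Int) (best_point : Int × Int), Dom_get_resolved_polygons p r best_point → Pre_get_resolved_polygons p r best_point → Spec_get_resolved_polygons p r best_point (get_resolved_polygons p r best_point)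


-- ===== LEMMAS AND PROOFS =====

-- index of the LAST occurrence, structurally
def grpLastIdx? {α : Type} [BEq α] : List α → α → Option Nat
  | [], _ => none
  | x :: xs, v =>
    match grpLastIdx? xs v with
    | some j => some (j + 1)
    | none => if x == v then some 0 else none

theorem grpLastIdx?_eq_none {α : Type} [BEq α] [LawfulBEq α] (xs : List α) (v : α) :
    grpLastIdx? xs v = none ↔ v ∉ xs := by
  induction xs with
  | nil => simp [grpLastIdx?]
  | cons x xs ih =>
    simp only [grpLastIdx?, List.mem_cons]
    cases h : grpLastIdx? xs v with
    | some j =>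
      have hv : v ∈ xs := by by_contra hv; rw [ih.mpr hv] at h; cases h
      simp [hv]
    | none => simp [h] at ih ⊢; tauto

theorem grpLastIdx?_spec {α : Type} [BEq α] [LawfulBEq α] (xs : List α) (v : α) (k : Nat)
    (h : grpLastIdx? xs v = some k) : k < xs.length ∧ xs[k]? = some v := by
  induction xs generalizing k with
  | nil => simp [grpLastIdx?] at h
  | cons x xs ih =>
    simp only [grpLastIdx?] at h
    cases h' : grpLastIdx? xs v with
    | some j =>
      rw [h'] at h
      obtain ⟨h1, h2⟩ := ih j h'
      cases h
      simpa using ⟨h1, h2⟩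
    | none =>
      rw [h'] at h
      by_cases hx : x = v
      · simp [hx] at h; cases h; simp [hx]
      · simp [hx] at h

-- nothing equal to v strictly after the last occurrence
theorem grpLastIdx?_last {α : Type} [BEq α] [LawfulBEq α] (xs : List α) (v : α) (k : Nat)
    (h : grpLastIdx? xs v = some k) : v ∉ xs.drop (k + 1) := by
  induction xs generalizing k with
  | nil => simp [grpLastIdx?] at h
  | cons x xs ih =>
    simp only [grpLastIdx?] at h
    cases h' : grpLastIdx? xs v with
    | some j =>
      rw [h'] at h
      cases h
      simpa using ih j h'
    | none =>
      rw [h'] at h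
      by_cases hx : x = v
      · simp [hx] at h
        cases h
        simpa using (grpLastIdx?_eq_none xs v).mp h'
      · simp [hx] at h

-- some element of grpLastIdx? exists iff the value occurs
theorem grpLastIdx?_isSome {α : Type} [BEq α] [LawfulBEq α] (xs : List α) (v : α) (hv : v ∈ xs) :
    ∃ k, grpLastIdx? xs v = some k := by
  cases h : grpLastIdx? xs v with
  | none => exact absurd ((grpLastIdx?_eq_none xs v).mp h) (by simpa using hv)
  | some k => exact ⟨k, rfl⟩

-- PySem.List.enumerate splits over append
theorem grpEnumerate_append {α : Type} (u v : List α) (s : Int) :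
    PySem.List.enumerate (u ++ v) s
      = PySem.List.enumerate u s ++ PySem.List.enumerate v (s + u.length) := by
  induction u generalizing s with
  | nil => simp [PySem.List.enumerate_nil]
  | cons x xs ih =>
    simp [PySem.List.enumerate_cons, ih, add_assoc]
    ring_nf

-- characterisation of A's first loop (needs r ≠ best_point: an element equal to both is impossible)
theorem grpLoop1 (p : List (Int × Int)) (r best_point : Int × Int) (hne : r ≠ best_point)
    (s : Int) (o1 o2 : Option Int) :
    (PySem.List.enumerate p s).foldl (grpAStep1 best_point r) (o1, o2)
      = ((match grpLastIdx? p best_point with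
          | some j => some (s + j)
          | none => o1),
         (match grpLastIdx? p r with
          | some j => some (s + j)
          | none => o2)) := by
  induction p generalizing s o1 o2 with
  | nil => simp [PySem.List.enumerate_nil, grpLastIdx?]
  | cons x xs ih =>
    rw [PySem.List.enumerate_cons, List.foldl_cons]
    by_cases hb : x = best_point
    · have hr : ¬ x = r := fun h => hne (by rw [← h, hb])
      rw [show grpAStep1 best_point r (o1, o2) (s, x) = (some s, o2) from by
        simp [grpAStep1, hb]]
      rw [ih]
      simp only [grpLastIdx?]
      cases h1 : grpLastIdx? xs best_point <;> cases h2 : grpLastIdx? xs r <;>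
        simp [hb, hr, hne, Ne.symm hne] <;> and_intros <;> first | trivial | omega | (intro hh; exact absurd hh hne) | simp [hne]
    · by_cases hr : x = r
      · rw [show grpAStep1 best_point r (o1, o2) (s, x) = (o1, some s) from by
          simp [grpAStep1, hb, hr, hne]]
        rw [ih]
        simp only [grpLastIdx?]
        cases h1 : grpLastIdx? xs best_point <;> cases h2 : grpLastIdx? xs r <;>
          simp [hb, hr, hne, Ne.symm hne] <;> and_intros <;> first | trivial | omega | (intro hh; exact absurd hh hne) | simp [hne]
      · rw [show grpAStep1 best_point r (o1, o2) (s, x) = (o1, o2) from by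
          simp [grpAStep1, hb, hr, hne]]
        rw [ih]
        simp only [grpLastIdx?]
        cases h1 : grpLastIdx? xs best_point <;> cases h2 : grpLastIdx? xs r <;>
          simp [hb, hr, hne, Ne.symm hne] <;> and_intros <;> first | trivial | omega | (intro hh; exact absurd hh hne) | simp [hne]

-- segment lemmas for A's second loop
theorem grpSeg_lt (i1 i2 : Int) (seg : List (Int × Int)) (s : Int) (a1 a2 : List (Int × Int))
    (h : s + seg.length ≤ min i1 i2) :
    (PySem.List.enumerate seg s).foldl (grpAStep2 i1 i2) (a1, a2) = (a1 ++ seg, a2) := by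
  induction seg generalizing s a1 with
  | nil => simp [PySem.List.enumerate_nil]
  | cons x xs ih =>
    simp only [List.length_cons] at h
    rw [PySem.List.enumerate_cons, List.foldl_cons]
    have hstep : grpAStep2 i1 i2 (a1, a2) (s, x) = (a1 ++ [x], a2) := by
      simp only [grpAStep2]
      rw [if_pos (by push_cast at h ⊢; omega)]
    rw [hstep, ih (s + 1) (a1 ++ [x]) (by push_cast at h ⊢; omega)]
    simp

theorem grpSeg_mid (i1 i2 : Int) (seg : List (Int × Int)) (s : Int) (a1 a2 : List (Int × Int))
    (hlo : min i1 i2 < s) (hhi : s + seg.length ≤ max i1 i2) :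
    (PySem.List.enumerate seg s).foldl (grpAStep2 i1 i2) (a1, a2) = (a1, a2 ++ seg) := by
  induction seg generalizing s a2 with
  | nil => simp [PySem.List.enumerate_nil]
  | cons x xs ih =>
    simp only [List.length_cons] at hhi
    rw [PySem.List.enumerate_cons, List.foldl_cons]
    have hstep : grpAStep2 i1 i2 (a1, a2) (s, x) = (a1, a2 ++ [x]) := by
      simp only [grpAStep2]
      rw [if_neg (by omega), if_neg (by omega),
          if_pos (by constructor <;> [omega; (push_cast at hhi ⊢; omega)])]
    rw [hstep, ih (s + 1) (a2 ++ [x]) (by omega) (by push_cast at hhi ⊢; omega)]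
    simp

theorem grpSeg_gt (i1 i2 : Int) (seg : List (Int × Int)) (s : Int) (a1 a2 : List (Int × Int))
    (h : max i1 i2 < s) :
    (PySem.List.enumerate seg s).foldl (grpAStep2 i1 i2) (a1, a2) = (a1 ++ seg, a2) := by
  induction seg generalizing s a1 with
  | nil => simp [PySem.List.enumerate_nil]
  | cons x xs ih =>
    rw [PySem.List.enumerate_cons, List.foldl_cons]
    have hstep : grpAStep2 i1 i2 (a1, a2) (s, x) = (a1 ++ [x], a2) := by
      simp only [grpAStep2]
      rw [if_neg (by omega), if_neg (by omega), if_neg (by omega), if_neg (by omega),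
          if_pos h]
    rw [hstep, ih (s + 1) (a1 ++ [x]) (by omega)]
    simp

-- closed form of A's second loop when the two indices are distinct naturals inside the list
theorem grpLoop2 (p : List (Int × Int)) (i1 i2 : Int) (m M : Nat)
    (hm : (m : Int) = min i1 i2) (hM : (M : Int) = max i1 i2)
    (hmM : m < M) (hMn : M < p.length) :
    (PySem.List.enumerate p).foldl (grpAStep2 i1 i2) ([], []) =
      (p.take (m + 1) ++ p.drop M, (p.drop m).take (M + 1 - m)) := by
  have hmn : m < p.length := by omega
  have h2 : p.drop m = p[m] :: p.drop (m + 1) := List.drop_eq_getElem_cons hmn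
  have h3 : p.drop (m + 1) = (p.drop (m + 1)).take (M - m - 1) ++ p.drop M := by
    conv_lhs => rw [← List.take_append_drop (M - m - 1) (p.drop (m + 1))]
    rw [List.drop_drop]
    have : m + 1 + (M - m - 1) = M := by omega
    rw [this]
  have h4 : p.drop M = p[M] :: p.drop (M + 1) := List.drop_eq_getElem_cons hMn
  have hmidlen : ((p.drop (m + 1)).take (M - m - 1)).length = M - m - 1 := by
    simp [List.length_take, List.length_drop]; omega
  have hdecomp : p = p.take m ++ p[m] ::
      ((p.drop (m + 1)).take (M - m - 1) ++ p[M] :: p.drop (M + 1)) := by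
    conv_lhs => rw [← List.take_append_drop m p, h2, h3, h4]
  conv_lhs => rw [hdecomp]
  rw [grpEnumerate_append, List.foldl_append]
  rw [grpSeg_lt i1 i2 (p.take m) 0 [] [] (by
    simp only [List.length_take]; push_cast; omega)]
  rw [PySem.List.enumerate_cons, List.foldl_cons]
  rw [show grpAStep2 i1 i2 ([] ++ p.take m, []) (0 + ↑(p.take m).length, p[m])
        = (([] ++ p.take m) ++ [p[m]], [] ++ [p[m]]) from by
    simp only [grpAStep2, List.length_take]
    rw [if_neg (by push_cast; omega), if_pos (by push_cast; omega)]]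
  rw [grpEnumerate_append, List.foldl_append]
  rw [grpSeg_mid i1 i2 ((p.drop (m + 1)).take (M - m - 1)) _ _ _ (by simp only [List.length_take]; push_cast; omega)
    (by simp only [hmidlen, List.length_take]; push_cast; omega)]
  rw [PySem.List.enumerate_cons, List.foldl_cons]
  rw [show grpAStep2 i1 i2 (([] ++ p.take m) ++ [p[m]], ([] ++ [p[m]]) ++ (p.drop (m + 1)).take (M - m - 1))
        (0 + ↑(p.take m).length + 1 + ↑((p.drop (m + 1)).take (M - m - 1)).length, p[M])
        = ((([] ++ p.take m) ++ [p[m]]) ++ [p[M]],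
           (([] ++ [p[m]]) ++ (p.drop (m + 1)).take (M - m - 1)) ++ [p[M]]) from by
    simp only [grpAStep2, List.length_take, hmidlen]
    rw [if_neg (by push_cast; omega), if_neg (by push_cast; omega),
        if_neg (by push_cast; omega), if_pos (by push_cast; omega)]]
  rw [grpSeg_gt i1 i2 (p.drop (M + 1)) _ _ _ (by
    simp only [hmidlen, List.length_take]; push_cast; omega)]
  have e1 : p.take (m + 1) = p.take m ++ [p[m]] := by
    rw [List.take_succ, List.getElem?_eq_getElem hmn]; rfl
  have e2 : (p.drop m).take (M + 1 - m)
      = p[m] :: ((p.drop (m + 1)).take (M - m - 1) ++ [p[M]]) := by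
    rw [h2]
    have hs : M + 1 - m = (M - m - 1) + 1 + 1 := by omega
    rw [hs, List.take_succ_cons]
    congr 1
    rw [List.take_succ]
    have hg : (p.drop (m + 1))[M - m - 1]? = some p[M] := by
      rw [List.getElem?_drop]
      have : m + 1 + (M - m - 1) = M := by omega
      rw [this, List.getElem?_eq_getElem hMn]
    rw [hg]; rfl
  rw [e1, e2, h4]
  simp

-- ===== B-side segment lemmas =====
theorem grpB_p2 (r bp : Int × Int) (ys h m t : List (Int × Int)) :
    ys.foldl (grpBStep r bp) (.p2, h, m, t) = (.p2, h ++ ys, m, t) := by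
  induction ys generalizing h with
  | nil => simp
  | cons x xs ih =>
    rw [List.foldl_cons]
    show xs.foldl (grpBStep r bp) (.p2, h ++ [x], m, t) = _
    rw [ih]; simp

theorem grpB_p1 (r bp tg : Int × Int) (ys h m t : List (Int × Int)) (hnot : tg ∉ ys) :
    ys.foldl (grpBStep r bp) (.p1 tg, h, m, t) = (.p1 tg, h, m ++ ys, t) := by
  induction ys generalizing m with
  | nil => simp
  | cons x xs ih =>
    simp only [List.mem_cons, not_or] at hnot
    rw [List.foldl_cons]
    have hstep : grpBStep r bp (.p1 tg, h, m, t) x = (.p1 tg, h, m ++ [x], t) := by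
      simp [grpBStep, Ne.symm hnot.1]
    rw [hstep, ih (m ++ [x]) hnot.2]; simp

theorem grpB_p0 (r bp : Int × Int) (ys h m t : List (Int × Int))
    (h1 : bp ∉ ys) (h2 : r ∉ ys) :
    ys.foldl (grpBStep r bp) (.p0, h, m, t) = (.p0, h, m, t ++ ys) := by
  induction ys generalizing t with
  | nil => simp
  | cons x xs ih =>
    simp only [List.mem_cons, not_or] at h1 h2
    rw [List.foldl_cons]
    have hstep : grpBStep r bp (.p0, h, m, t) x = (.p0, h, m, t ++ [x]) := by
      simp [grpBStep, Ne.symm h1.1, Ne.symm h2.1]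
    rw [hstep, ih (t ++ [x]) h1.2 h2.2]; simp

-- closed form of B for markers u at M (seen first from the right) and tg at m
theorem grpAltCore (p : List (Int × Int)) (r bp u tg : Int × Int) (m M : Nat)
    (hmM : m < M) (hMn : M < p.length)
    (hgm : p[m]? = some tg) (hgM : p[M]? = some u)
    (hcond : u = bp ∨ u = r) (htgdef : (if u = bp then r else bp) = tg)
    (hC1 : bp ∉ p.drop (M + 1)) (hC2 : r ∉ p.drop (M + 1))
    (hmid : tg ∉ (p.drop (m + 1)).take (M - m - 1)) :
    get_resolved_polygons_alt p r bp
      = (p.take (m + 1) ++ p.drop M, (p.drop m).take (M + 1 - m)) := by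
  have hmn : m < p.length := by omega
  have hgm' : p[m] = tg := by rw [List.getElem?_eq_getElem hmn] at hgm; exact Option.some.inj hgm
  have hgM' : p[M] = u := by rw [List.getElem?_eq_getElem hMn] at hgM; exact Option.some.inj hgM
  have h2 : p.drop m = p[m] :: p.drop (m + 1) := List.drop_eq_getElem_cons hmn
  have h3 : p.drop (m + 1) = (p.drop (m + 1)).take (M - m - 1) ++ p.drop M := by
    conv_lhs => rw [← List.take_append_drop (M - m - 1) (p.drop (m + 1))]
    rw [List.drop_drop]
    have : m + 1 + (M - m - 1) = M := by omega
    rw [this]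
  have h4 : p.drop M = p[M] :: p.drop (M + 1) := List.drop_eq_getElem_cons hMn
  have hdecomp : p = p.take m ++ p[m] ::
      ((p.drop (m + 1)).take (M - m - 1) ++ p[M] :: p.drop (M + 1)) := by
    conv_lhs => rw [← List.take_append_drop m p, h2, h3, h4]
  unfold get_resolved_polygons_alt
  conv_lhs => rw [hdecomp]
  rw [hgm', hgM']
  have hrev : (p.take m ++ tg :: ((p.drop (m + 1)).take (M - m - 1) ++ u :: p.drop (M + 1))).reverse
      = ((p.drop (M + 1)).reverse ++ [u]) ++ (((p.drop (m + 1)).take (M - m - 1)).reverse ++ [tg])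
        ++ (p.take m).reverse := by
    simp
  rw [hrev, List.foldl_append, List.foldl_append, List.foldl_append, List.foldl_append]
  rw [grpB_p0 r bp (p.drop (M + 1)).reverse [] [] [] (by simpa using hC1) (by simpa using hC2)]
  have hstepM : grpBStep r bp (.p0, [], [], [] ++ (p.drop (M + 1)).reverse) u
      = (.p1 tg, [], [] ++ [u], ([] ++ (p.drop (M + 1)).reverse) ++ [u]) := by
    simp only [grpBStep]
    rw [if_pos hcond, htgdef]
  simp only [List.foldl_cons, List.foldl_nil]
  rw [hstepM]
  rw [grpB_p1 r bp tg ((p.drop (m + 1)).take (M - m - 1)).reverse _ _ _ (by simpa using hmid)]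
  have hsteptg : grpBStep r bp
      (.p1 tg, [], ([] ++ [u]) ++ ((p.drop (m + 1)).take (M - m - 1)).reverse,
        ([] ++ (p.drop (M + 1)).reverse) ++ [u]) tg
      = (.p2, [] ++ [tg], (([] ++ [u]) ++ ((p.drop (m + 1)).take (M - m - 1)).reverse) ++ [tg],
          ([] ++ (p.drop (M + 1)).reverse) ++ [u]) := by
    simp [grpBStep]
  rw [hsteptg]
  rw [grpB_p2]
  have e1 : p.take (m + 1) = p.take m ++ [p[m]] := by
    rw [List.take_succ, List.getElem?_eq_getElem hmn]; rfl
  have e2 : (p.drop m).take (M + 1 - m)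
      = p[m] :: ((p.drop (m + 1)).take (M - m - 1) ++ [p[M]]) := by
    rw [h2]
    have hs : M + 1 - m = (M - m - 1) + 1 + 1 := by omega
    rw [hs, List.take_succ_cons]
    congr 1
    rw [List.take_succ]
    have hg : (p.drop (m + 1))[M - m - 1]? = some p[M] := by
      rw [List.getElem?_drop]
      have : m + 1 + (M - m - 1) = M := by omega
      rw [this, List.getElem?_eq_getElem hMn]
    rw [hg]; rfl
  simp only [e1, e2, h4, hgm', hgM']
  simp

-- ===== VERDICT (by name: the statements are the Claim_ definitions above) =====
theorem get_resolved_polygons_spec : Claim_equal_get_resolved_polygons := by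
  unfold Claim_equal_get_resolved_polygons
  intro p r bp _ hpre
  unfold Spec_get_resolved_polygons
  rcases hpre with hnil | ⟨hbp, hr, hne⟩
  · subst hnil
    simp [get_resolved_polygons, get_resolved_polygons_alt, PySem.List.enumerate_nil]
  obtain ⟨k1, hk1⟩ := grpLastIdx?_isSome p bp hbp
  obtain ⟨k2, hk2⟩ := grpLastIdx?_isSome p r hr
  obtain ⟨hk1n, hg1⟩ := grpLastIdx?_spec p bp _ hk1
  obtain ⟨hk2n, hg2⟩ := grpLastIdx?_spec p r _ hk2
  have hkne : k1 ≠ k2 := by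
    intro h
    rw [h, hg2] at hg1
    exact hne (by simpa using hg1)
  have hloop1 := grpLoop1 p r bp hne 0 none none
  rw [hk1, hk2] at hloop1
  have hA : get_resolved_polygons p r bp
      = (p.take (min k1 k2 + 1) ++ p.drop (max k1 k2),
         (p.drop (min k1 k2)).take (max k1 k2 + 1 - min k1 k2)) := by
    unfold get_resolved_polygons
    rw [hloop1]
    simp only [zero_add]
    rw [grpLoop2 p (k1 : Int) (k2 : Int) (min k1 k2) (max k1 k2)
      (by push_cast; omega) (by push_cast; omega) (by omega) (by omega)]
  rw [hA]
  have hlast1 := grpLastIdx?_last p bp _ hk1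
  have hlast2 := grpLastIdx?_last p r _ hk2
  rcases Nat.lt_or_ge k1 k2 with hlt | hge
  · -- k1 < k2: lo = k1 (best_point), hi = k2 (r)
    have := grpAltCore p r bp r bp k1 k2 hlt hk2n hg1 hg2 (Or.inr rfl)
      (by rw [if_neg hne])
      (by intro hmem
          exact hlast1 (List.mem_of_mem_drop (i := k2 + 1 - (k1 + 1))
            (by rw [List.drop_drop]; have : k1 + 1 + (k2 + 1 - (k1 + 1)) = k2 + 1 := by omega
                rw [this]; exact hmem)))
      hlast2
      (fun hmem => hlast1 (List.mem_of_mem_take hmem))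
    rw [this]
    simp [Nat.min_eq_left (Nat.le_of_lt hlt), Nat.max_eq_right (Nat.le_of_lt hlt)]
  · have hlt : k2 < k1 := by omega
    have := grpAltCore p r bp bp r k2 k1 hlt hk1n hg2 hg1 (Or.inl rfl)
      (by rw [if_pos rfl])
      hlast1
      (by intro hmem
          exact hlast2 (List.mem_of_mem_drop (i := k1 + 1 - (k2 + 1))
            (by rw [List.drop_drop]; have : k2 + 1 + (k1 + 1 - (k2 + 1)) = k1 + 1 := by omega
                rw [this]; exact hmem)))
      (fun hmem => hlast2 (List.mem_of_mem_take hmem))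
    rw [this]
    simp [Nat.min_eq_right (Nat.le_of_lt hlt), Nat.max_eq_left (Nat.le_of_lt hlt)]
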